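-- pv_equiv track=rewrite | github.com/UrsusSalificus/SignatureOrigene | scripts/removing_overlaps.py | intersects
-- ===== SOURCE A (Python) =====
-- def intersects(a, b):
--     overlap_ranges = list()
--     i = j = 0
--     while i < len(a) and j < len(b):
--         a_left, a_right = a[i]
--         b_left, b_right = b[j]
--         end_pts = sorted([a_left, a_right, b_left, b_right])
--         middle = [end_pts[1], end_pts[2]]
--
--         if a_right < b_right:
--             i += 1
--         else:
--             j += 1
--
--         if a_right >= b_left and b_right >= a_left:
--             overlap_ranges.append(middle)
--
--     length_of_list = len(overlap_ranges)
--
--     # We will also merge two intervals which are next to each other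
--     i = 0
--     while i < (length_of_list - 1):
--         if overlap_ranges[i][1] in (overlap_ranges[i + 1][0], overlap_ranges[i + 1][0] - 1):
--             overlap_ranges[i:i + 2] = [[overlap_ranges[i][0], overlap_ranges[i + 1][1]]]
--             length_of_list -= 1
--         else:
--             i += 1
--
--     return overlap_ranges
-- ===== SOURCE B (Python) =====
-- def intersects(a, b):
--     # one fused pass: sweep both lists (consuming reversed copies from the end)
--     # and merge touching/1-gap intervals into the result as they are produced.
--     ra = a[::-1]
--     rb = b[::-1]
--     res = []
--     while ra and rb:
--         a_left, a_right = ra[-1]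
--         b_left, b_right = rb[-1]
--         if a_right >= b_left and b_right >= a_left:
--             lo, hi = sorted((a_left, a_right, b_left, b_right))[1:3]
--             if res and res[-1][1] in (lo, lo - 1):
--                 res[-1][1] = hi
--             else:
--                 res.append([lo, hi])
--         if a_right < b_right:
--             ra.pop()
--         else:
--             rb.pop()
--     return res
-- ===== Notes on version B (the rewrite author's own statement) =====
-- stated objective: alternative
-- what changed: B replaces A's two passes (collect all overlap middles, then an index-based rescan that splices adjacent touching/1-gap intervals) with a single fused sweep that consumes reversed copies of the inputs from the end and merges each new overlap into the tail of the result as it is produced, so the second loop and its list splicing disappear.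
import Mathlib
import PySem

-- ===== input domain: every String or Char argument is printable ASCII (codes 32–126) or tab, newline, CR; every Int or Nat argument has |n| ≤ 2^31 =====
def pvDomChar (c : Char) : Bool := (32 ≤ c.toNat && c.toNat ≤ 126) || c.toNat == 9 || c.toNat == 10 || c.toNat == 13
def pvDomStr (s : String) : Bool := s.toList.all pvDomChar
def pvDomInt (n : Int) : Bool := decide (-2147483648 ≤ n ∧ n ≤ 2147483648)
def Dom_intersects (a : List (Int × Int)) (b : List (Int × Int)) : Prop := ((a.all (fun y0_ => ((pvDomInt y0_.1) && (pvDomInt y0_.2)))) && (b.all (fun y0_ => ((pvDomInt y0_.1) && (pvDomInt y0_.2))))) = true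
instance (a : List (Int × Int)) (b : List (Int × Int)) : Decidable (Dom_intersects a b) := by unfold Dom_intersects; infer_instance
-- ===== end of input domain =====

-- B fuses A's two passes (collect overlaps, then re-scan to merge touching/1-gap
-- intervals) into one sweep that merges each new overlap into the result as it is
-- produced (objective: alternative, same asymptotic cost, one pass instead of two).

-- ===== PORT A =====
-- middle = sorted([a_left, a_right, b_left, b_right])[1:3]
def pvMid (al ar bl br : Int) : List Int :=
  let endPts := PySem.List.sorted [al, ar, bl, br] (fun x => x) false
  [endPts.getD 1 0, endPts.getD 2 0]

-- A's first while loop (two-pointer sweep collecting the overlap middles)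
def pvSweepA (a b : List (Int × Int)) (i j : Nat) : List (List Int) :=
  if h : i < a.length ∧ j < b.length then
    let al := (a.getD i (0, 0)).1
    let ar := (a.getD i (0, 0)).2
    let bl := (b.getD j (0, 0)).1
    let br := (b.getD j (0, 0)).2
    let rest := if ar < br then pvSweepA a b (i + 1) j else pvSweepA a b i (j + 1)
    if ar ≥ bl ∧ br ≥ al then pvMid al ar bl br :: rest else rest
  else []
termination_by (a.length - i) + (b.length - j)
decreasing_by all_goals omega

-- A's second while loop (index-based in-place merging of adjacent intervals)
def pvMergeLoopA (xs : List (List Int)) (i : Nat) : List (List Int) :=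
  if h : i + 1 < xs.length then
    let x := xs.getD i []
    let y := xs.getD (i + 1) []
    if x.getD 1 0 = y.getD 0 0 ∨ x.getD 1 0 = y.getD 0 0 - 1 then
      pvMergeLoopA (xs.take i ++ [x.getD 0 0, y.getD 1 0] :: xs.drop (i + 2)) i
    else
      pvMergeLoopA xs (i + 1)
  else xs
termination_by 2 * xs.length - i
decreasing_by
  · simp only [List.length_append, List.length_take, List.length_cons, List.length_drop]
    omega
  · omega

def intersects (a : List (Int × Int)) (b : List (Int × Int)) : List (List Int) :=
  pvMergeLoopA (pvSweepA a b 0 0) 0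

-- ===== PORT B =====
-- B's in-place merge of a new overlap [lo, hi] into the tail of the result
def pvPushB (res : List (List Int)) (lo hi : Int) : List (List Int) :=
  if res ≠ [] ∧ ((res.getLastD []).getD 1 0 = lo ∨ (res.getLastD []).getD 1 0 = lo - 1) then
    res.dropLast ++ [[(res.getLastD []).getD 0 0, hi]]
  else
    res ++ [[lo, hi]]

-- B's single fused loop, consuming the reversed copies from the end
def pvSweepB (ra rb : List (Int × Int)) (res : List (List Int)) : List (List Int) :=
  if h : ra ≠ [] ∧ rb ≠ [] then
    let al := (ra.getLastD (0, 0)).1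
    let ar := (ra.getLastD (0, 0)).2
    let bl := (rb.getLastD (0, 0)).1
    let br := (rb.getLastD (0, 0)).2
    let res' :=
      if ar ≥ bl ∧ br ≥ al then
        let e := PySem.List.sorted [al, ar, bl, br] (fun x => x) false
        pvPushB res (e.getD 1 0) (e.getD 2 0)
      else res
    if ar < br then pvSweepB ra.dropLast rb res' else pvSweepB ra rb.dropLast res'
  else res
termination_by ra.length + rb.length
decreasing_by
  · have := List.length_pos_iff.mpr h.1
    simp only [List.length_dropLast]; omega
  · have := List.length_pos_iff.mpr h.2
    simp only [List.length_dropLast]; omega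

def intersects_alt (a : List (Int × Int)) (b : List (Int × Int)) : List (List Int) :=
  pvSweepB a.reverse b.reverse []

-- ===== PRECONDITION & SPEC =====
def Spec_intersects (a : List (Int × Int)) (b : List (Int × Int)) (out : List (List Int)) : Prop := out = intersects_alt a b
instance (a : List (Int × Int)) (b : List (Int × Int)) (out : List (List Int)) : Decidable (Spec_intersects a b out) := by unfold Spec_intersects; infer_instance

-- ===== CLAIM (what is proved, stated in full; the proofs are below) =====
def Claim_equal_intersects : Prop := ∀ (a : List (Int × Int)) (b : List (Int × Int)), Dom_intersects a b → Spec_intersects a b (intersects a b)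

-- ===== LEMMAS AND PROOFS =====

-- front-recursive characterisation of A's sweep
def pvSweepF : List (Int × Int) → List (Int × Int) → List (List Int)
  | [], _ => []
  | _ :: _, [] => []
  | (al, ar) :: as', (bl, br) :: bs' =>
    let rest := if ar < br then pvSweepF as' ((bl, br) :: bs') else pvSweepF ((al, ar) :: as') bs'
    if ar ≥ bl ∧ br ≥ al then pvMid al ar bl br :: rest else rest
termination_by xs ys => xs.length + ys.length

-- front-recursive characterisation of A's merge loop
def pvMergeF : List (List Int) → List (List Int)
  | [] => []
  | [x] => [x]
  | x :: y :: rest =>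
    if x.getD 1 0 = y.getD 0 0 ∨ x.getD 1 0 = y.getD 0 0 - 1 then
      pvMergeF ([x.getD 0 0, y.getD 1 0] :: rest)
    else x :: pvMergeF (y :: rest)
termination_by l => l.length
decreasing_by all_goals simp

def pvPushM (res : List (List Int)) (m : List Int) : List (List Int) :=
  pvPushB res (m.getD 0 0) (m.getD 1 0)

-- front-recursive characterisation of B's fused loop
def pvSpecF : List (Int × Int) → List (Int × Int) → List (List Int) → List (List Int)
  | [], _, res => res
  | _ :: _, [], res => res
  | (al, ar) :: as', (bl, br) :: bs', res =>
    let res' := if ar ≥ bl ∧ br ≥ al then pvPushM res (pvMid al ar bl br) else res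
    if ar < br then pvSpecF as' ((bl, br) :: bs') res' else pvSpecF ((al, ar) :: as') bs' res'
termination_by xs ys _ => xs.length + ys.length

theorem sweepA_eq (a b : List (Int × Int)) (i j : Nat) :
    pvSweepA a b i j = pvSweepF (a.drop i) (b.drop j) := by
  fun_induction pvSweepA a b i j with
  | case1 i j h al ar bl br rest hc ih2 ih1 =>
    have g1 : (a.getD i (0,0)) = (a[i].1, a[i].2) := by rw [List.getD_eq_getElem a (0,0) h.1]
    have g2 : (b.getD j (0,0)) = (b[j].1, b[j].2) := by rw [List.getD_eq_getElem b (0,0) h.2]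
    have e1 : List.drop i a = (a[i].1, a[i].2) :: List.drop (i+1) a := by
      rw [List.drop_eq_getElem_cons h.1]
    have e2 : List.drop j b = (b[j].1, b[j].2) :: List.drop (j+1) b := by
      rw [List.drop_eq_getElem_cons h.2]
    simp only [al, ar, bl, br, g1, g2] at hc
    simp only [al, ar, bl, br, rest, g1, g2, ih1, ih2, e1, e2, pvSweepF]
    rw [if_pos hc]
    split <;> rfl
  | case2 i j h al ar bl br rest hc ih2 ih1 =>
    have g1 : (a.getD i (0,0)) = (a[i].1, a[i].2) := by rw [List.getD_eq_getElem a (0,0) h.1]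
    have g2 : (b.getD j (0,0)) = (b[j].1, b[j].2) := by rw [List.getD_eq_getElem b (0,0) h.2]
    have e1 : List.drop i a = (a[i].1, a[i].2) :: List.drop (i+1) a := by
      rw [List.drop_eq_getElem_cons h.1]
    have e2 : List.drop j b = (b[j].1, b[j].2) :: List.drop (j+1) b := by
      rw [List.drop_eq_getElem_cons h.2]
    simp only [al, ar, bl, br, g1, g2] at hc
    simp only [al, ar, bl, br, rest, g1, g2, ih1, ih2, e1, e2, pvSweepF]
    rw [if_neg hc]
    split <;> rfl
  | case3 i j h =>
    rcases Nat.lt_or_ge i a.length with hi | hi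
    · have hj : b.length ≤ j := by omega
      rw [List.drop_eq_nil_of_le hj]
      cases List.drop i a <;> simp [pvSweepF]
    · rw [List.drop_eq_nil_of_le hi]
      simp [pvSweepF]

theorem mergeF_short (l : List (List Int)) (h : l.length ≤ 1) : pvMergeF l = l := by
  match l with
  | [] => simp [pvMergeF]
  | [x] => simp [pvMergeF]
  | x :: y :: r => simp at h

theorem mergeLoopA_eq (xs : List (List Int)) (i : Nat) :
    pvMergeLoopA xs i = xs.take i ++ pvMergeF (xs.drop i) := by
  fun_induction pvMergeLoopA xs i with
  | case1 xs i h x y hc ih =>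
    have hi : i < xs.length := by omega
    have ht : (List.take i xs).length = i := by simp; omega
    have d1 : List.drop i xs = xs.getD i [] :: xs.getD (i+1) [] :: List.drop (i+2) xs := by
      rw [List.drop_eq_getElem_cons hi, List.drop_eq_getElem_cons h,
        List.getD_eq_getElem xs [] hi, List.getD_eq_getElem xs [] h]
    rw [ih, List.take_left' ht, List.drop_left' ht, d1]
    simp only [x, y, pvMergeF]
    rw [if_pos hc]
  | case2 xs i h x y hc ih =>
    have hi : i < xs.length := by omega
    have d1 : List.drop i xs = xs.getD i [] :: xs.getD (i+1) [] :: List.drop (i+2) xs := by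
      rw [List.drop_eq_getElem_cons hi, List.drop_eq_getElem_cons h,
        List.getD_eq_getElem xs [] hi, List.getD_eq_getElem xs [] h]
    have t1 : List.take (i+1) xs = List.take i xs ++ [xs.getD i []] := by
      rw [List.take_add_one, List.getElem?_eq_getElem hi, List.getD_eq_getElem xs [] hi]
      rfl
    rw [ih, d1, t1]
    simp only [x, y, pvMergeF]
    rw [if_neg hc]
    have d2 : List.drop (i+1) xs = xs.getD (i+1) [] :: List.drop (i+2) xs := by
      rw [List.drop_eq_getElem_cons h, List.getD_eq_getElem xs [] h]
    rw [d2]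
    simp
  | case3 xs i h =>
    rw [mergeF_short _ (by simp; omega), List.take_append_drop]

theorem sweepB_eq (xs ys : List (Int × Int)) (res : List (List Int)) :
    pvSweepB xs.reverse ys.reverse res = pvSpecF xs ys res := by
  fun_induction pvSpecF xs ys res with
  | case1 ys res =>
    rw [pvSweepB]
    simp
  | case2 x xs res =>
    rw [pvSweepB]
    simp
  | case3 al ar as' bl br bs' res res' h ih =>
    have hne : ((al,ar)::as').reverse ≠ [] ∧ ((bl,br)::bs').reverse ≠ [] := by simp
    have dla : ((al,ar)::as').reverse.dropLast = as'.reverse := by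
      rw [List.reverse_cons, List.dropLast_concat]
    have gla : ((al,ar)::as').reverse.getLastD (0,0) = (al,ar) := by
      rw [List.getLastD_eq_getLast?, List.getLast?_reverse]; rfl
    have glb : ((bl,br)::bs').reverse.getLastD (0,0) = (bl,br) := by
      rw [List.getLastD_eq_getLast?, List.getLast?_reverse]; rfl
    rw [pvSweepB, dif_pos hne]
    simp only [gla, glb, dla]
    rw [if_pos h]
    exact ih
  | case4 al ar as' bl br bs' res res' h ih =>
    have hne : ((al,ar)::as').reverse ≠ [] ∧ ((bl,br)::bs').reverse ≠ [] := by simp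
    have dlb : ((bl,br)::bs').reverse.dropLast = bs'.reverse := by
      rw [List.reverse_cons, List.dropLast_concat]
    have gla : ((al,ar)::as').reverse.getLastD (0,0) = (al,ar) := by
      rw [List.getLastD_eq_getLast?, List.getLast?_reverse]; rfl
    have glb : ((bl,br)::bs').reverse.getLastD (0,0) = (bl,br) := by
      rw [List.getLastD_eq_getLast?, List.getLast?_reverse]; rfl
    rw [pvSweepB, dif_pos hne]
    simp only [gla, glb, dlb]
    rw [if_neg h]
    exact ih

theorem specF_eq (xs ys : List (Int × Int)) (res : List (List Int)) :
    pvSpecF xs ys res = (pvSweepF xs ys).foldl pvPushM res := by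
  fun_induction pvSpecF xs ys res with
  | case1 ys res => simp [pvSweepF]
  | case2 x xs res => simp [pvSweepF]
  | case3 al ar as' bl br bs' res res' h ih =>
    rw [ih]
    by_cases hc : ar ≥ bl ∧ br ≥ al
    · simp only [pvSweepF, res', dif_pos hc, if_pos hc, if_pos h, List.foldl_cons]
    · simp only [pvSweepF, res', dif_neg hc, if_neg hc, if_pos h]
  | case4 al ar as' bl br bs' res res' h ih =>
    rw [ih]
    by_cases hc : ar ≥ bl ∧ br ≥ al
    · simp only [pvSweepF, res', dif_pos hc, if_pos hc, if_neg h, List.foldl_cons]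
    · simp only [pvSweepF, res', dif_neg hc, if_neg hc, if_neg h]

def pvTwoE (m : List Int) : Prop := ∃ p q, m = [p, q]

theorem sweepF_twoE (xs ys : List (Int × Int)) : ∀ m ∈ pvSweepF xs ys, pvTwoE m := by
  fun_induction pvSweepF xs ys with
  | case1 ys => simp
  | case2 x xs => simp
  | case3 al ar as' bl br bs' rest hc ih2 ih1 =>
    intro m hm
    rcases List.mem_cons.mp hm with h' | h'
    · subst h'
      exact ⟨_, _, rfl⟩
    · simp only [rest] at h'
      split at h'
      · exact ih2 m h'
      · exact ih1 m h'
  | case4 al ar as' bl br bs' rest hc ih2 ih1 =>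
    intro m hm
    simp only [rest] at hm
    split at hm
    · exact ih2 m hm
    · exact ih1 m hm

theorem foldl_push_eq (ms : List (List Int)) (h : ∀ m ∈ ms, pvTwoE m)
    (res : List (List Int)) (x : List Int) :
    List.foldl pvPushM (res ++ [x]) ms = res ++ pvMergeF (x :: ms) := by
  induction ms generalizing res x with
  | nil => simp [pvMergeF]
  | cons m ms ih =>
    have hms : ∀ m' ∈ ms, pvTwoE m' := fun m' hm' => h m' (by simp [hm'])
    obtain ⟨p, q, rfl⟩ := h m (by simp)
    by_cases hc : x.getD 1 0 = ([p, q] : List Int).getD 0 0 ∨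
        x.getD 1 0 = ([p, q] : List Int).getD 0 0 - 1
    · have hp : pvPushM (res ++ [x]) [p, q] = res ++ [[x.getD 0 0, q]] := by
        simp only [pvPushM, pvPushB, List.getLastD_concat]
        rw [if_pos ⟨(by simp), hc⟩, List.dropLast_concat]
        simp
      rw [List.foldl_cons, hp, ih hms]
      simp only [pvMergeF]
      rw [if_pos hc]
      simp
    · have hp : pvPushM (res ++ [x]) [p, q] = (res ++ [x]) ++ [[p, q]] := by
        simp only [pvPushM, pvPushB, List.getLastD_concat]
        rw [if_neg (fun hh => hc hh.2)]
        simp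
      rw [List.foldl_cons, hp, ih hms]
      simp only [pvMergeF]
      rw [if_neg hc]
      simp

theorem foldl_push_nil (ms : List (List Int)) (h : ∀ m ∈ ms, pvTwoE m) :
    List.foldl pvPushM [] ms = pvMergeF ms := by
  cases ms with
  | nil => simp [pvMergeF]
  | cons m rest =>
    obtain ⟨p, q, rfl⟩ := h m (by simp)
    have h1 : pvPushM [] [p, q] = [] ++ [[p, q]] := by simp [pvPushM, pvPushB]
    rw [List.foldl_cons, h1,
      foldl_push_eq rest (fun m' hm' => h m' (by simp [hm'])) [] [p, q]]
    simp [pvMergeF]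

-- ===== VERDICT (by name: the statement is the Claim_ definition above) =====
theorem intersects_spec : Claim_equal_intersects := by
  intro a b _
  unfold Spec_intersects intersects intersects_alt
  rw [mergeLoopA_eq, sweepA_eq, sweepB_eq, specF_eq, foldl_push_nil _ (sweepF_twoE a b)]
  simp
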